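-- pv_equiv track=rewrite | github.com/aibaellord/BeatProductionBeast | src/demo/mini_demo.py | generate_beat_visualization
-- ===== SOURCE A (Python) =====
-- from typing import Dict, List, Tuple
--
-- def generate_beat_visualization(pattern: List[int]) -> str:
--     """Generate a visual representation of the beat pattern."""
--     result = ""
--     bar_length = 16  # 16 beats per bar
--
--     for i in range(0, len(pattern), bar_length):
--         bar = pattern[i : i + bar_length]
--         bar_viz = ""
--
--         for intensity in bar:
--             if intensity >= 75:
--                 bar_viz += "X"  # Strong beat
--             elif intensity >= 40:
--                 bar_viz += "o"  # Medium beat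
--             elif intensity > 0:
--                 bar_viz += "·"  # Soft beat
--             else:
--                 bar_viz += " "  # No beat
--
--         result += f"Bar {i//bar_length + 1}: |{bar_viz}|\n"
--
--     return result
-- ===== SOURCE B (Python) =====
-- def beat_char(v):
--     """Map one intensity to its display character."""
--     return "X" if v >= 75 else "o" if v >= 40 else "\u00b7" if v > 0 else " "
--
-- def generate_beat_visualization(pattern):
--     """Generate a visual representation of the beat pattern.
--
--     Single streaming pass: accumulate characters in a buffer and flush a
--     finished line every time the buffer reaches 16 characters; flush the
--     remainder (if any) once at the end. No slicing, no index arithmetic.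
--     """
--     lines = []
--     buf = []
--     bar = 1
--     for v in pattern:
--         buf.append(beat_char(v))
--         if len(buf) == 16:
--             lines.append(f"Bar {bar}: |{''.join(buf)}|\n")
--             buf = []
--             bar += 1
--     if buf:
--         lines.append(f"Bar {bar}: |{''.join(buf)}|\n")
--     return "".join(lines)
-- ===== Notes on version B (the rewrite author's own statement) =====
-- stated objective: alternative
-- what changed: B is a single streaming pass with an explicit buffer: each intensity's character is pushed into a buffer that is flushed as a formatted line exactly when it reaches 16 characters (remainder flushed once at the end), replacing A's outer range-step loop that slices a 16-element chunk per bar and runs an inner loop over it.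
import Mathlib
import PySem

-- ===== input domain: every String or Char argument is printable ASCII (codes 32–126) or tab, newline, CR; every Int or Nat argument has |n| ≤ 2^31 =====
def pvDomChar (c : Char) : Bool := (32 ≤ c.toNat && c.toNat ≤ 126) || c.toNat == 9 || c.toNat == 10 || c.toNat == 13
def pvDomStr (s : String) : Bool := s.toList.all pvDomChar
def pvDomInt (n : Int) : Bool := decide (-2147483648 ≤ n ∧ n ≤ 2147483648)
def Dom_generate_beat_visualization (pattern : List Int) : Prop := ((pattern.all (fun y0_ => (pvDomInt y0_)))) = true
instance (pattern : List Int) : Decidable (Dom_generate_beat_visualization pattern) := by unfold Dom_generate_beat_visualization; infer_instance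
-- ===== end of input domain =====

-- B replaces A's slice-per-bar nested loops by one streaming pass with a buffer flushed at 16 chars (same O(n); objective: alternative decomposition).


-- ===== PORT A =====
def generate_beat_visualization (pattern : List Int) : String :=
  (PySem.List.pyRange 0 (pattern.length : Int) 16).foldl
    (fun result i =>
      let bar := PySem.List.slice pattern (some i) (some (i + 16))
      let bar_viz := bar.foldl (fun acc intensity =>
        if intensity ≥ 75 then acc ++ "X"
        else if intensity ≥ 40 then acc ++ "o"
        else if intensity > 0 then acc ++ "·"
        else acc ++ " ") ""
      result ++ "Bar " ++ PySem.Int.toStr (PySem.Int.floordiv i 16 + 1) ++ ": |" ++ bar_viz ++ "|\n")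
    ""

-- ===== PORT B =====
-- Source B's beat_char helper
def bviz_char (v : Int) : String :=
  if v ≥ 75 then "X" else if v ≥ 40 then "o" else if v > 0 then "·" else " "

-- the body of Source B's single for-loop: push one char, flush the buffer when it reaches 16
def bviz_step (s : List String × List String × Int) (v : Int) : List String × List String × Int :=
  let (lines, buf, bar) := s
  let buf := buf ++ [bviz_char v]
  if buf.length = 16 then
    (lines ++ ["Bar " ++ PySem.Int.toStr bar ++ ": |" ++ String.join buf ++ "|\n"], [], bar + 1)
  else (lines, buf, bar)

def generate_beat_visualization_alt (pattern : List Int) : String :=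
  let s := pattern.foldl bviz_step ([], [], 1)
  let lines := s.1
  let buf := s.2.1
  let bar := s.2.2
  let lines := if buf ≠ [] then
      lines ++ ["Bar " ++ PySem.Int.toStr bar ++ ": |" ++ String.join buf ++ "|\n"]
    else lines
  String.join lines

-- ===== PRECONDITION & SPEC =====
def Spec_generate_beat_visualization (pattern : List Int) (out : String) : Prop := out = generate_beat_visualization_alt pattern
instance (pattern : List Int) (out : String) : Decidable (Spec_generate_beat_visualization pattern out) := by unfold Spec_generate_beat_visualization; infer_instance

-- ===== CLAIM (what is proved, stated in full; the proofs are below) =====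
def Claim_equal_generate_beat_visualization : Prop := ∀ (pattern : List Int), Dom_generate_beat_visualization pattern → Spec_generate_beat_visualization pattern (generate_beat_visualization pattern)

-- ===== LEMMAS AND PROOFS =====

-- the line emitted for a chunk of intensities, bar number `bar`
def mkLine (bar : Int) (chunk : List Int) : String :=
  "Bar " ++ PySem.Int.toStr bar ++ ": |" ++ String.join (chunk.map bviz_char) ++ "|\n"

-- common chunked description of the output: lines for the 16-chunks of l, bars numbered from `bar`
def chunkLines (l : List Int) (bar : Int) : List String :=
  if h : l = [] then []
  else mkLine bar (l.take 16) :: chunkLines (l.drop 16) (bar + 1)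
termination_by l.length
decreasing_by
  have := List.length_pos_of_ne_nil h
  simp [List.length_drop]; omega

-- foldl-append over strings is append of the join.
lemma foldl_append_join (l : List String) (s : String) :
    List.foldl (fun r t => r ++ t) s l = s ++ String.join l := by
  induction l generalizing s with
  | nil => simp [String.join]
  | cons x xs ih =>
      simp only [List.foldl, String.join]
      rw [ih, ih ("" ++ x)]
      simp [String.append_assoc]

lemma join_cons (x : String) (xs : List String) :
    String.join (x :: xs) = x ++ String.join xs := by
  rw [show String.join (x :: xs) = List.foldl (fun r t => r ++ t) "" (x :: xs) from rfl]
  simp only [List.foldl]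
  rw [foldl_append_join]
  simp

lemma join_append (a b : List String) :
    String.join (a ++ b) = String.join a ++ String.join b := by
  induction a with
  | nil => simp [String.join]
  | cons x xs ih => simp [join_cons, ih, String.append_assoc]

-- A's inner character loop is the join of the mapped characters.
lemma inner_fold_eq (l : List Int) (acc : String) :
    l.foldl (fun acc intensity =>
        if intensity ≥ 75 then acc ++ "X"
        else if intensity ≥ 40 then acc ++ "o"
        else if intensity > 0 then acc ++ "·"
        else acc ++ " ") acc = acc ++ String.join (l.map bviz_char) := by
  induction l generalizing acc with
  | nil => simp [String.join]
  | cons x xs ih =>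
      simp only [List.foldl, List.map, join_cons]
      rw [ih]
      unfold bviz_char
      split_ifs <;> simp [String.append_assoc]

-- The line A emits for offset i.
def lineA (pattern : List Int) (i : Int) : String :=
  "Bar " ++ PySem.Int.toStr (PySem.Int.floordiv i 16 + 1) ++ ": |" ++
    String.join ((PySem.List.slice pattern (some i) (some (i + 16))).map bviz_char) ++ "|\n"

-- A's outer loop is the join of the lines.
lemma outer_fold_eq (pattern : List Int) (l : List Int) (acc : String) :
    l.foldl
      (fun result i =>
        let bar := PySem.List.slice pattern (some i) (some (i + 16))
        let bar_viz := bar.foldl (fun acc intensity =>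
          if intensity ≥ 75 then acc ++ "X"
          else if intensity ≥ 40 then acc ++ "o"
          else if intensity > 0 then acc ++ "·"
          else acc ++ " ") ""
        result ++ "Bar " ++ PySem.Int.toStr (PySem.Int.floordiv i 16 + 1) ++ ": |" ++ bar_viz ++ "|\n") acc
    = acc ++ String.join (l.map (lineA pattern)) := by
  induction l generalizing acc with
  | nil => simp [String.join]
  | cons x xs ih =>
      simp only [List.foldl, List.map, join_cons]
      rw [inner_fold_eq, ih, lineA]
      simp [String.append_assoc]

-- A's step-16 range enumerates 16k for k < ceil(len/16).
lemma rangeA_eq (len : Nat) :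
    PySem.List.pyRange 0 (len : Int) 16 = (List.range ((len + 15) / 16)).map (fun k => ((16 * k : Nat) : Int)) := by
  rw [PySem.List.pyRange_of_pos 0 (len : Int) (by norm_num)]
  have hcnt : (if (0:Int) < len then (((len:Int) - 0 + 16 - 1) / 16).toNat else 0) = (len + 15) / 16 := by
    split_ifs with h <;> omega
  rw [hcnt]
  apply List.map_congr_left
  intro k _
  push_cast; ring

-- The k-th line of A equals mkLine of the k-th 16-chunk.
lemma line_eq (pattern : List Int) (k : Nat) :
    lineA pattern (16 * k : Nat) = mkLine ((k : Int) + 1) ((pattern.drop (16 * k)).take 16) := by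
  unfold lineA mkLine
  have h1 : PySem.Int.floordiv ((16 * k : Nat) : Int) 16 + 1 = (k : Int) + 1 := by
    rw [PySem.Int.floordiv_eq_ediv_of_pos (by norm_num : (0:Int) < 16)]
    omega
  have h3 : PySem.List.slice pattern (some ((16 * k : Nat) : Int)) (some (((16 * k : Nat) : Int) + 16)) =
      (pattern.drop (16 * k)).take 16 := by
    have hb : (((16 * k : Nat) : Int) + 16) = ((16 * k : Nat) : Int) + ((16 : Nat) : Int) := by norm_num
    rw [hb, PySem.List.slice_natCast_add]
  rw [h1, h3]

-- The ranged line list IS the chunked description.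
lemma range_eq_chunkLines (l : List Int) (bar : Int) :
    (List.range ((l.length + 15) / 16)).map (fun (k : Nat) => mkLine (bar + (k : Int)) ((l.drop (16 * k)).take 16))
      = chunkLines l bar := by
  by_cases h : l = []
  · subst h; simp [chunkLines.eq_def]
  · have hlen : 0 < l.length := List.length_pos_of_ne_nil h
    have hN : (l.length + 15) / 16 = ((l.drop 16).length + 15) / 16 + 1 := by
      rw [List.length_drop]; omega
    rw [chunkLines.eq_def]
    simp only [h, dite_false]
    rw [hN, List.range_succ_eq_map, List.map_cons, List.map_map]
    congr 1
    · simp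
    · rw [← range_eq_chunkLines (l.drop 16) (bar + 1)]
      apply List.map_congr_left
      intro k _
      simp only [Function.comp]
      rw [List.drop_drop]
      congr 1
      · push_cast; ring
      · congr 2; omega
termination_by l.length
decreasing_by
  have := List.length_pos_of_ne_nil h
  simp [List.length_drop]; omega

-- helper line from a buffer of characters
def bufLine (bar : Int) (buf : List String) : String :=
  "Bar " ++ PySem.Int.toStr bar ++ ": |" ++ String.join buf ++ "|\n"

lemma mkLine_eq_bufLine (bar : Int) (chunk : List Int) :
    mkLine bar chunk = bufLine bar (chunk.map bviz_char) := rfl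

-- B: processing a short suffix never flushes.
lemma partial_fill (l : List Int) (out buf : List String) (bar : Int)
    (h : buf.length + l.length < 16) :
    l.foldl bviz_step (out, buf, bar) = (out, buf ++ l.map bviz_char, bar) := by
  induction l generalizing buf with
  | nil => simp
  | cons x xs ih =>
      simp only [List.foldl, bviz_step]
      have hlt : (buf ++ [bviz_char x]).length ≠ 16 := by
        simp at h ⊢; omega
      simp only [hlt, if_false]
      rw [ih]
      · simp
      · simp at h ⊢; omega
  
-- B: processing exactly enough elements to reach 16 flushes exactly once, at the end.
lemma fill (l : List Int) (out buf : List String) (bar : Int)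
    (hne : l ≠ []) (h : buf.length + l.length = 16) :
    l.foldl bviz_step (out, buf, bar)
      = (out ++ [bufLine bar (buf ++ l.map bviz_char)], [], bar + 1) := by
  induction l generalizing buf with
  | nil => exact absurd rfl hne
  | cons x xs ih =>
      simp only [List.foldl, bviz_step]
      by_cases hx : xs = []
      · subst hx
        have h16 : (buf ++ [bviz_char x]).length = 16 := by simp at h ⊢; omega
        simp [h16, bufLine]
      · have hlt : (buf ++ [bviz_char x]).length ≠ 16 := by
          have := List.length_pos_of_ne_nil hx
          simp at h ⊢; omega
        simp only [hlt, if_false]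
        rw [ih (buf ++ [bviz_char x]) hx (by simp at h ⊢; omega)]
        simp
  
-- finishing step of B (end-of-loop remainder flush + join)
def bfinish (s : List String × List String × Int) : String :=
  String.join (if s.2.1 ≠ [] then s.1 ++ [bufLine s.2.2 s.2.1] else s.1)

-- B's whole loop computes the joined chunk lines.
lemma loopB_eq (l : List Int) (out : List String) (bar : Int) :
    bfinish (l.foldl bviz_step (out, [], bar)) = String.join out ++ String.join (chunkLines l bar) := by
  by_cases h : l = []
  · subst h; simp [bfinish, chunkLines.eq_def, String.join]
  · by_cases hlen : l.length < 16
    · rw [partial_fill l out [] bar (by simpa using hlen)]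
      have hmap : l.map bviz_char ≠ [] := by simpa using h
      have htake : l.take 16 = l := List.take_of_length_le (by omega)
      have hdrop : l.drop 16 = [] := List.drop_eq_nil_of_le (by omega)
      rw [chunkLines.eq_def]
      simp only [h, dite_false, htake, hdrop]
      rw [show chunkLines [] (bar+1) = [] from by simp [chunkLines.eq_def]]
      simp [bfinish, hmap, mkLine_eq_bufLine, String.join]
    · have hsplit : l = l.take 16 ++ l.drop 16 := (List.take_append_drop 16 l).symm
      conv_lhs => rw [hsplit]
      rw [List.foldl_append]
      rw [fill (l.take 16) out [] bar
            (fun hc => h ((List.take_eq_nil_iff.mp hc).resolve_left (by omega)))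
            (by simp only [List.length_nil, List.length_take]; omega)]
      simp only [List.nil_append]
      rw [loopB_eq (l.drop 16) (out ++ [bufLine bar ((l.take 16).map bviz_char)]) (bar + 1)]
      conv_rhs => rw [chunkLines.eq_def]
      simp only [h, dite_false]
      rw [join_cons, join_append, mkLine_eq_bufLine]
      simp [String.append_assoc, String.join]
termination_by l.length
decreasing_by
  have := List.length_pos_of_ne_nil h
  simp [List.length_drop]; omega

-- ===== VERDICT (by name: the statement is the Claim_ definition above) =====
theorem generate_beat_visualization_spec : Claim_equal_generate_beat_visualization := by
  intro pattern _
  unfold Spec_generate_beat_visualization generate_beat_visualization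
  rw [rangeA_eq, outer_fold_eq]
  have hB : generate_beat_visualization_alt pattern
      = bfinish (pattern.foldl bviz_step ([], [], 1)) := by
    unfold generate_beat_visualization_alt bfinish
    rfl
  rw [hB, loopB_eq, ← range_eq_chunkLines pattern 1, List.map_map]
  have hmaps : (List.range ((pattern.length + 15) / 16)).map (lineA pattern ∘ fun k => ((16 * k : Nat) : Int))
      = (List.range ((pattern.length + 15) / 16)).map
          (fun (k : Nat) => mkLine (1 + (k : Int)) ((pattern.drop (16 * k)).take 16)) := by
    apply List.map_congr_left
    intro k _
    simp only [Function.comp]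
    rw [line_eq]
    congr 1
    ring
  rw [hmaps]
  simp [String.join]
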